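-- pv_equiv track=rewrite | github.com/Zendellll/236207-Project | main_exp/validate_judge.py | _pair_clean
-- ===== SOURCE A (Python) =====
-- from typing import Dict, List, Optional, Sequence, Tuple
--
-- def _pair_clean(
--     a: Sequence[object],
--     b: Sequence[object],
-- ) -> Tuple[List[object], List[object], int]:
--     """Drop pairs where either side is None. Returns (a', b', dropped_count)."""
--     out_a, out_b, dropped = [], [], 0
--     for x, y in zip(a, b):
--         if x is None or y is None:
--             dropped += 1
--             continue
--         out_a.append(x)
--         out_b.append(y)
--     return out_a, out_b, dropped
-- ===== SOURCE B (Python) =====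
-- def _pair_clean(a, b):
--     """Drop pairs where either side is None. Returns (a', b', dropped_count)."""
--     n = min(len(a), len(b))
--     keep = [i for i in range(n) if a[i] is not None and b[i] is not None]
--     out_a = [a[i] for i in keep]
--     out_b = [b[i] for i in keep]
--     return out_a, out_b, n - len(keep)
-- ===== Notes on version B (the rewrite author's own statement) =====
-- stated objective: alternative
-- what changed: Replaces A's single accumulating pass over zip(a,b) (two growing lists plus an incremental dropped counter) with an index-set decomposition: compute the list of kept indices over range(min(len(a),len(b))), then project a and b through that index list in two separate passes, with dropped obtained by length subtraction.
import Mathlib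
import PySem

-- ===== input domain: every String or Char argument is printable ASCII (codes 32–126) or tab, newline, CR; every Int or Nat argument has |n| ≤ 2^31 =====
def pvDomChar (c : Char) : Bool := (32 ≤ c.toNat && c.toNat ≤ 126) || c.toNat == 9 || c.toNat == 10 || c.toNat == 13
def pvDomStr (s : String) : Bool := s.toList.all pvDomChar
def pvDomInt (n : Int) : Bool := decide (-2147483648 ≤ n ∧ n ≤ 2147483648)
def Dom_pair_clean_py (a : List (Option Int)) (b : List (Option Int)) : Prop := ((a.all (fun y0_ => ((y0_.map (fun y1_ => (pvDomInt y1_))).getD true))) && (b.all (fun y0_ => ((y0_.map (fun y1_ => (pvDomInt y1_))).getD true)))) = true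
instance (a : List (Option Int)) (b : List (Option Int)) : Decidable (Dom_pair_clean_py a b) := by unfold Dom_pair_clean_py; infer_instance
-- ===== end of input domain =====

-- B replaces A's single accumulating pass over zip(a,b) with an index-set decomposition:
-- kept indices over range(min len), then two projection passes (objective: alternative, same cost).

-- ===== PORT A =====
-- A's loop over zip(a, b), accumulating out_a, out_b and the dropped counter.
def pair_clean_py (a : List (Option Int)) (b : List (Option Int)) : List (Option Int) × List (Option Int) × Int :=
  (a.zip b).foldl
    (fun st p =>
      match p with
      | (x, y) =>
        if x = none ∨ y = none then (st.1, st.2.1, st.2.2 + 1)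
        else (st.1 ++ [x], st.2.1 ++ [y], st.2.2))
    ([], [], 0)

-- ===== PORT B =====
-- n = min(len(a), len(b)); keep = indices i < n with both sides non-None;
-- out_a, out_b project a, b through keep; dropped = n - len(keep).
-- a[i] is ported as a.getD i none: every i here is a Nat with i < n ≤ a.length, so this is exact.
def pair_clean_py_alt (a : List (Option Int)) (b : List (Option Int)) : List (Option Int) × List (Option Int) × Int :=
  let n := min a.length b.length
  let keep := (List.range n).filter (fun i => (a.getD i none).isSome && (b.getD i none).isSome)
  let out_a := keep.map (fun i => a.getD i none)
  let out_b := keep.map (fun i => b.getD i none)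
  (out_a, out_b, (n : Int) - (keep.length : Int))

-- ===== PRECONDITION & SPEC =====
def Spec_pair_clean_py (a : List (Option Int)) (b : List (Option Int)) (out : List (Option Int) × List (Option Int) × Int) : Prop := out = pair_clean_py_alt a b
instance (a : List (Option Int)) (b : List (Option Int)) (out : List (Option Int) × List (Option Int) × Int) : Decidable (Spec_pair_clean_py a b out) := by unfold Spec_pair_clean_py; infer_instance

-- ===== CLAIM (what is proved, stated in full; the proofs are below) =====
def Claim_equal_pair_clean_py : Prop := ∀ (a : List (Option Int)) (b : List (Option Int)), Dom_pair_clean_py a b → Spec_pair_clean_py a b (pair_clean_py a b)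

-- ===== LEMMAS AND PROOFS =====

-- A's loop computes the zip-filter closed form with dropped = length difference.
theorem pair_clean_loop_inv (l : List (Option Int × Option Int))
    (oa ob : List (Option Int)) (d : Int) :
    l.foldl
      (fun st p =>
        match p with
        | (x, y) =>
          if x = none ∨ y = none then (st.1, st.2.1, st.2.2 + 1)
          else (st.1 ++ [x], st.2.1 ++ [y], st.2.2))
      (oa, ob, d)
    = (oa ++ (l.filter (fun p => p.1.isSome && p.2.isSome)).map Prod.fst,
       ob ++ (l.filter (fun p => p.1.isSome && p.2.isSome)).map Prod.snd,
       d + ((l.length : Int) - ((l.filter (fun p => p.1.isSome && p.2.isSome)).length : Int))) := by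
  induction l generalizing oa ob d with
  | nil => simp
  | cons hd tl ih =>
    obtain ⟨x, y⟩ := hd
    by_cases hx : x = none ∨ y = none
    · have hfil : (x.isSome && y.isSome) = false := by
        rcases hx with h | h <;> subst h <;> simp
      simp only [List.foldl_cons, List.filter_cons, hfil, List.length_cons, if_pos hx]
      rw [ih]
      simp only [Prod.mk.injEq]
      refine ⟨rfl, rfl, ?_⟩
      push_cast
      ring
    · have hfil : (x.isSome && y.isSome) = true := by
        push Not at hx
        simp [Option.isSome_iff_ne_none, hx.1, hx.2]
      simp only [List.foldl_cons, List.filter_cons, hfil, List.length_cons, if_neg hx]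
      rw [ih]
      simp only [Prod.mk.injEq]
      refine ⟨by simp, by simp, ?_⟩
      push_cast [List.length_cons]
      ring

-- zip as an indexed map over range of the min length.
theorem zip_eq_range_map (a b : List (Option Int)) :
    a.zip b = (List.range (min a.length b.length)).map
      (fun i => (a.getD i none, b.getD i none)) := by
  induction a generalizing b with
  | nil => simp
  | cons x ta ih =>
    cases b with
    | nil => simp
    | cons y tb =>
      simp only [List.zip_cons_cons, List.length_cons]
      rw [Nat.succ_min_succ, List.range_succ_eq_map]
      simp only [List.map_cons, List.map_map, List.getD_cons_zero]
      rw [ih tb]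
      congr 1

-- ===== VERDICT (by name: the statement is the Claim_ definition above) =====
theorem pair_clean_py_spec : Claim_equal_pair_clean_py := by
  intro a b _
  unfold Spec_pair_clean_py pair_clean_py pair_clean_py_alt
  rw [pair_clean_loop_inv, zip_eq_range_map]
  simp only [List.nil_append, List.filter_map, List.map_map, List.length_map, List.length_range,
    Function.comp_def, zero_add]
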